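-- pv_equiv track=rewrite | github.com/cyberofficial/Synthalingua | modules/sub_gen.py | detect_repeated_segments
-- ===== SOURCE A (Python) =====
-- from typing import Tuple, Dict, Any, Optional, List
--
-- def detect_repeated_segments(segments: List[Dict], threshold: int = 3) -> Tuple[bool, List[str], int]:
--     """
--     Detect if there are repeated segments in the transcription.
--
--     Args:
--         segments (List[Dict]): List of segments from Whisper
--         threshold (int): Minimum number of repetitions to consider problematic
--
--     Returns:
--         Tuple[bool, List[str], int]: (has_repetitions, repeated_texts, max_consecutive_count)
--     """
--     if len(segments) < threshold:
--         return False, [], 0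
--
--     repeated_texts = []
--     max_consecutive = 0
--     current_consecutive = 1
--
--     for i in range(1, len(segments)):
--         current_text = segments[i].get("text", "").strip().lower()
--         previous_text = segments[i-1].get("text", "").strip().lower()
--
--         # Only consider non-empty texts with reasonable length for repetition detection
--         if (current_text and previous_text and
--             len(current_text) > 3 and len(previous_text) > 3 and  # Ignore very short segments
--             current_text == previous_text):
--             current_consecutive += 1
--             max_consecutive = max(max_consecutive, current_consecutive)
--
--             if current_consecutive >= threshold and current_text not in repeated_texts:
--                 repeated_texts.append(current_text)
--         else:
--             current_consecutive = 1
--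
--     has_repetitions = max_consecutive >= threshold
--     return has_repetitions, repeated_texts, max_consecutive
-- ===== SOURCE B (Python) =====
-- from itertools import groupby
--
-- def detect_repeated_segments(segments, threshold=3):
--     if len(segments) < threshold:
--         return False, [], 0
--     texts = [seg.get("text", "").strip().lower() for seg in segments]
--     repeated_texts = []
--     seen = set()
--     max_consecutive = 0
--     for text, grp in groupby(texts):
--         run = sum(1 for _ in grp)
--         if len(text) > 3 and run >= 2:
--             max_consecutive = max(max_consecutive, run)
--             if run >= threshold and text not in seen:
--                 seen.add(text)
--                 repeated_texts.append(text)
--     return max_consecutive >= threshold, repeated_texts, max_consecutive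
-- ===== Notes on version B (the rewrite author's own statement) =====
-- stated objective: idiomatic
-- what changed: Replaces the index loop comparing segments[i] to segments[i-1] with one pairwise state machine by an itertools.groupby pass over the precomputed normalized texts, processing each consecutive run (text, run_length) as a whole.
import Mathlib
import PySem

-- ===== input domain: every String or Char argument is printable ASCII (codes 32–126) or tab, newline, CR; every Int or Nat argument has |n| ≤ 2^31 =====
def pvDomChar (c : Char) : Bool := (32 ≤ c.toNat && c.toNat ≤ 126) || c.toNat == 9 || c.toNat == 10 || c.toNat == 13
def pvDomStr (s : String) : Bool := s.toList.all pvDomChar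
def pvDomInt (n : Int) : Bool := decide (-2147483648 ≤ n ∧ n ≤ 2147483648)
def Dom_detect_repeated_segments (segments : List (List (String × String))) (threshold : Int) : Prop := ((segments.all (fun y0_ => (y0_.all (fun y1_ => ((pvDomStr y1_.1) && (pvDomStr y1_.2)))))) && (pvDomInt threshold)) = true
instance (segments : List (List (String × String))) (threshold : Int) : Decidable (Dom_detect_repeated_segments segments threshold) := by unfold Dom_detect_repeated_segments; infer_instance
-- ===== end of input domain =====

-- B replaces A's index loop with pairwise comparisons by a groupby-style run-length
-- pass over the normalized texts (objective: idiomatic); same return value everywhere.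

-- ===== PORT A =====
-- seg.get("text", "").strip().lower()  (shared helper: both Pythons use this exact expression)
def pvNorm (seg : List (String × String)) : String :=
  PySem.Str.lower (PySem.Str.strip (PySem.Dict.getD ⟨seg⟩ "text" ""))

-- A's loop body; state = (repeated_texts, max_consecutive, current_consecutive)
def pvStepA (threshold : Int) (s : List String × Int × Int) (cur prev : String) :
    List String × Int × Int :=
  if cur ≠ "" ∧ prev ≠ "" ∧ 3 < PySem.Str.len cur ∧ 3 < PySem.Str.len prev ∧ cur = prev then
    let cc := s.2.2 + 1
    let mc := max s.2.1 cc
    let rep := if threshold ≤ cc ∧ cur ∉ s.1 then s.1 ++ [cur] else s.1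
    (rep, mc, cc)
  else (s.1, s.2.1, 1)

def detect_repeated_segments (segments : List (List (String × String))) (threshold : Int) :
    Bool × List String × Int :=
  if PySem.List.len segments < threshold then (false, [], 0)
  else
    let st := (PySem.List.pyRange 1 (PySem.List.len segments)).foldl
      (fun s i => pvStepA threshold s (pvNorm (PySem.List.pyGetD segments i []))
                                      (pvNorm (PySem.List.pyGetD segments (i - 1) []))) ([], 0, 1)
    (decide (threshold ≤ st.2.1), st.1, st.2.1)

-- ===== PORT B =====
-- itertools.groupby + per-group count: run-length encoding of the text list
def pvRunsAux (x : String) (n : Int) : List String → List (String × Int)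
  | [] => [(x, n)]
  | y :: ys => if y == x then pvRunsAux x (n + 1) ys else (x, n) :: pvRunsAux y 1 ys

def pvRuns : List String → List (String × Int)
  | [] => []
  | x :: xs => pvRunsAux x 1 xs

-- B's loop body over a (text, run) group; state = (repeated_texts, seen, max_consecutive)
def pvStepB (threshold : Int) (s : List String × PySem.Set String × Int) (tr : String × Int) :
    List String × PySem.Set String × Int :=
  if 3 < PySem.Str.len tr.1 ∧ 2 ≤ tr.2 then
    let mc := max s.2.2 tr.2
    if threshold ≤ tr.2 ∧ ¬ PySem.Set.contains s.2.1 tr.1 = true then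
      (s.1 ++ [tr.1], PySem.Set.add s.2.1 tr.1, mc)
    else (s.1, s.2.1, mc)
  else s

def detect_repeated_segments_alt (segments : List (List (String × String))) (threshold : Int) :
    Bool × List String × Int :=
  if PySem.List.len segments < threshold then (false, [], 0)
  else
    let texts := segments.map pvNorm
    let st := (pvRuns texts).foldl (pvStepB threshold) ([], PySem.Set.empty, 0)
    (decide (threshold ≤ st.2.2), st.1, st.2.2)

-- ===== PRECONDITION & SPEC =====
def Spec_detect_repeated_segments (segments : List (List (String × String))) (threshold : Int) (out : Bool × List String × Int) : Prop := out = detect_repeated_segments_alt segments threshold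
instance (segments : List (List (String × String))) (threshold : Int) (out : Bool × List String × Int) : Decidable (Spec_detect_repeated_segments segments threshold out) := by unfold Spec_detect_repeated_segments; infer_instance

-- ===== CLAIM (what is proved, stated in full; the proofs are below) =====
def Claim_equal_detect_repeated_segments : Prop := ∀ (segments : List (List (String × String))) (threshold : Int), Dom_detect_repeated_segments segments threshold → Spec_detect_repeated_segments segments threshold (detect_repeated_segments segments threshold)

-- ===== LEMMAS AND PROOFS =====

-- A's index loop seen as a pairwise walk: f state cur prev, prev trailing one behind.
def pvPairFold (f : List String × Int × Int → String → String → List String × Int × Int)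
    (s : List String × Int × Int) (prev : String) : List String → List String × Int × Int
  | [] => s
  | y :: ys => pvPairFold f (f s y prev) y ys

-- A's state in the middle of a run of `prev` of which n ≥ 1 copies have been consumed;
-- rep0/mc0 is the state at the start of the run.
def pvStA (threshold : Int) (prev : String) (n : Int) (rep0 : List String) (mc0 : Int) :
    List String × Int × Int :=
  if 3 < PySem.Str.len prev then
    (if threshold ≤ n ∧ 2 ≤ n ∧ prev ∉ rep0 then rep0 ++ [prev] else rep0,
     if 2 ≤ n then max mc0 n else mc0,
     n)
  else (rep0, mc0, 1)

theorem pvStA_one (threshold : Int) (prev : String) (rep0 : List String) (mc0 : Int) :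
    pvStA threshold prev 1 rep0 mc0 = (rep0, mc0, 1) := by
  unfold pvStA; split_ifs <;> simp_all

theorem pv_len_pos_ne (s : String) (h : 3 < PySem.Str.len s) : s ≠ "" := by
  intro he; subst he; simp [PySem.Str.len_eq] at h

-- index loop over pyRange k..len with xs[i], xs[i-1]  =  pairwise walk from xs[k-1]
theorem pv_idx_pair (f : List String × Int × Int → String → String → List String × Int × Int)
    (ts : List String) : ∀ (m k : Nat) (init : List String × Int × Int),
    ts.length - k = m → 1 ≤ k → k ≤ ts.length →
    (PySem.List.pyRange (k : Int) (ts.length : Int)).foldl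
      (fun s i => f s (PySem.List.pyGetD ts i "") (PySem.List.pyGetD ts (i - 1) "")) init
    = pvPairFold f init (ts.getD (k - 1) "") (ts.drop k) := by
  intro m
  induction m with
  | zero =>
    intro k init hm h1 hk
    have hkl : k = ts.length := by omega
    subst hkl
    have hnil : PySem.List.pyRange (ts.length : Int) (ts.length : Int) = [] := by
      simp [PySem.List.pyRange]
    simp [hnil, List.drop_length, pvPairFold]
  | succ m ih =>
    intro k init hm h1 hk
    have hlt : k < ts.length := by omega
    rw [PySem.List.pyRange_one_cons (by exact_mod_cast hlt)]
    simp only [List.foldl_cons]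
    have hget : PySem.List.pyGetD ts (k : Int) "" = ts[k] := by
      rw [PySem.List.pyGetD_natCast]
      simp [List.getD_eq_getElem?_getD, hlt]
    have hget' : PySem.List.pyGetD ts ((k : Int) - 1) "" = ts.getD (k - 1) "" := by
      have hc : ((k : Int) - 1) = ((k - 1 : Nat) : Int) := by omega
      rw [hc, PySem.List.pyGetD_natCast]
    rw [hget, hget']
    have hcast : ((k : Int) + 1) = ((k + 1 : Nat) : Int) := by omega
    rw [hcast, ih (k + 1) _ (by omega) (by omega) (by omega)]
    have hdrop : ts.drop k = ts[k] :: ts.drop (k + 1) := List.drop_eq_getElem_cons hlt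
    rw [hdrop]
    simp [pvPairFold, hlt, List.getD_eq_getElem?_getD]

-- one A-step inside a run (cur = prev) advances the run state
theorem pv_stepA_run (threshold : Int) (prev : String) (n : Int) (hn : 1 ≤ n)
    (rep0 : List String) (mc0 : Int) :
    pvStepA threshold (pvStA threshold prev n rep0 mc0) prev prev
      = pvStA threshold prev (n + 1) rep0 mc0 := by
  by_cases hq : 3 < PySem.Str.len prev
  · have hne := pv_len_pos_ne prev hq
    have hq' : 3 < prev.length := by simpa [PySem.Str.len_eq] using hq
    by_cases hmem : prev ∈ rep0
    · simp only [pvStA, pvStepA]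
      simp [hq', hne, hmem]
      omega
    · simp only [pvStA, pvStepA]
      simp only [PySem.Str.len_eq, String.length_toList] at *
      split_ifs <;> simp_all <;> omega
  · have hq' : ¬ 3 < prev.length := by simpa [PySem.Str.len_eq] using hq
    simp [pvStA, pvStepA, hq']

-- an A-step across a run boundary (cur ≠ prev) resets the counter
theorem pv_stepA_break (threshold : Int) (s : List String × Int × Int) (y prev : String)
    (hy : y ≠ prev) : pvStepA threshold s y prev = (s.1, s.2.1, 1) := by
  simp [pvStepA, hy]

-- B's step on a completed run (prev, n) from a state whose seen set equals rep0
theorem pv_stepB_eq (threshold : Int) (prev : String) (n : Int)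
    (rep0 : List String) (mc0 : Int) :
    pvStepB threshold (rep0, rep0, mc0) (prev, n)
      = ((pvStA threshold prev n rep0 mc0).1, (pvStA threshold prev n rep0 mc0).1,
         (pvStA threshold prev n rep0 mc0).2.1) := by
  by_cases hq : 3 < PySem.Str.len prev
  · simp only [pvStA, pvStepB, PySem.Set.add, PySem.Set.contains]
    simp only [PySem.Str.len_eq, String.length_toList] at *
    split_ifs <;> simp_all
  · have hq' : ¬ 3 < prev.length := by simpa [PySem.Str.len_eq] using hq
    simp [pvStA, pvStepB, hq']

-- the core bridge: A's pairwise walk along the rest equals B's fold over its runs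
theorem pv_bridge (threshold : Int) : ∀ (rest : List String) (prev : String) (n : Int)
    (hn : 1 ≤ n) (rep0 : List String) (mc0 : Int),
    (pvPairFold (pvStepA threshold) (pvStA threshold prev n rep0 mc0) prev rest).1
      = ((pvRunsAux prev n rest).foldl (pvStepB threshold) (rep0, rep0, mc0)).1
    ∧ (pvPairFold (pvStepA threshold) (pvStA threshold prev n rep0 mc0) prev rest).2.1
      = ((pvRunsAux prev n rest).foldl (pvStepB threshold) (rep0, rep0, mc0)).2.2 := by
  intro rest
  induction rest with
  | nil =>
    intro prev n hn rep0 mc0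
    simp [pvPairFold, pvRunsAux, pv_stepB_eq threshold prev n rep0 mc0]
  | cons y ys ih =>
    intro prev n hn rep0 mc0
    by_cases hy : y = prev
    · subst hy
      simp only [pvPairFold, pvRunsAux, beq_self_eq_true, if_true]
      rw [pv_stepA_run threshold y n hn rep0 mc0]
      exact ih y (n + 1) (by omega) rep0 mc0
    · simp only [pvPairFold, pvRunsAux, beq_iff_eq, hy, if_false, List.foldl_cons]
      rw [pv_stepA_break threshold _ y prev hy]
      rw [pv_stepB_eq threshold prev n rep0 mc0]
      have h := ih y 1 (by omega) (pvStA threshold prev n rep0 mc0).1 (pvStA threshold prev n rep0 mc0).2.1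
      rw [pvStA_one] at h
      exact h

-- the two ports agree on every input
theorem pv_main (segments : List (List (String × String))) (threshold : Int) :
    detect_repeated_segments segments threshold = detect_repeated_segments_alt segments threshold := by
  unfold detect_repeated_segments detect_repeated_segments_alt
  by_cases hg : PySem.List.len segments < threshold
  · simp only [if_pos hg]
  · simp only [hg, if_false]
    cases segments with
    | nil =>
      simp [pvRuns, PySem.List.pyRange, PySem.List.len]
    | cons s0 rest =>
      have hb : ∀ (i : Int), pvNorm (PySem.List.pyGetD (s0 :: rest) i [])
          = PySem.List.pyGetD ((s0 :: rest).map pvNorm) i "" := by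
        intro i
        have h := PySem.List.pyGetD_map pvNorm (s0 :: rest) i []
        have h0 : pvNorm [] = "" := rfl
        rw [h0] at h
        exact h.symm
      have hfun : (fun (s : List String × Int × Int) (i : Int) =>
            pvStepA threshold s (pvNorm (PySem.List.pyGetD (s0 :: rest) i []))
              (pvNorm (PySem.List.pyGetD (s0 :: rest) (i - 1) [])))
          = (fun s i => pvStepA threshold s (PySem.List.pyGetD ((s0 :: rest).map pvNorm) i "")
              (PySem.List.pyGetD ((s0 :: rest).map pvNorm) (i - 1) "")) := by
        funext s i; rw [hb, hb]
      rw [hfun]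
      have hlen : PySem.List.len (s0 :: rest) = (((s0 :: rest).map pvNorm).length : Int) := by
        simp [PySem.List.len_eq]
      rw [hlen]
      have hip := pv_idx_pair (pvStepA threshold) ((s0 :: rest).map pvNorm)
        (((s0 :: rest).map pvNorm).length - 1) 1 ([], 0, 1) rfl (by omega) (by simp)
      simp only [Nat.cast_one] at hip
      rw [hip]
      have hinit : (([], 0, 1) : List String × Int × Int)
          = pvStA threshold (pvNorm s0) 1 [] 0 := (pvStA_one threshold (pvNorm s0) [] 0).symm
      rw [hinit]
      have hbr := pv_bridge threshold (rest.map pvNorm) (pvNorm s0) 1 (by omega) [] 0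
      have hgd : (pvNorm s0 :: List.map pvNorm rest).getD (1 - 1) "" = pvNorm s0 := rfl
      have hruns : pvRuns (pvNorm s0 :: List.map pvNorm rest) = pvRunsAux (pvNorm s0) 1 (List.map pvNorm rest) := rfl
      have hempty : (([], PySem.Set.empty, 0) : List String × PySem.Set String × Int)
          = (([], [], 0) : List String × PySem.Set String × Int) := rfl
      simp only [List.map_cons, hgd, hruns, hempty] at hbr ⊢
      simp only [List.drop_one, List.tail_cons] at ⊢
      simp only [hbr.1, hbr.2]

-- ===== VERDICT (by name: the statement is the Claim_ definition above) =====
theorem detect_repeated_segments_spec : Claim_equal_detect_repeated_segments := by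
  intro segments threshold _
  unfold Spec_detect_repeated_segments
  exact pv_main segments threshold
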